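-- pv_equiv track=rewrite | github.com/ShiLab-Bioinformatics/ReadTrimming | src/SupplTab1-trim-clip.py | calc_uniq
-- ===== SOURCE A (Python) =====
-- def calc_uniq(Rl, Rc, Tl, Tp, Pa):
-- 	Rgaps=[]
-- 	Rgap_len=0
-- 	tmpi = 0
-- 	Rcur = 0
-- 	for ch in Rc:
-- 		if ch.isdigit():
-- 			tmpi = tmpi*10+int(ch)
-- 		else:
-- 			if ch=='S':
-- 				Rgaps.append( [ Rcur, Rcur+tmpi ] )
-- 				Rgap_len += tmpi
-- 			if ch in ('S','M','I'): Rcur += tmpi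
-- 			tmpi = 0
--
-- 	Tgaps=[]
-- 	Tgap_len=0
-- 	if Tp>0:
-- 		Tgap_len += Tp
-- 		Tgaps=[ [0,Tp] ]
-- 	if Tp + Tl < Rl:
-- 		Tgaps.append( [ Tp+Tl, Rl ] )
-- 		Tgap_len += Rl - (Tp+Tl)
--
-- 	common = 0
-- 	common_are_adaptor = 0
-- 	for Rgap in Rgaps:
-- 		for Tgap in Tgaps:
-- 			common_end = min(Rgap[1], Tgap[1])
-- 			common_start = max( Rgap[0], Tgap[0] )
-- 			overlap = common_end - common_start
--
-- 			if overlap>0: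
-- 				common+= overlap
-- 				for pure_gap in Pa:
-- 					coco_start = max(pure_gap[0], common_start )
-- 					coco_end = min(pure_gap[1], common_end )
-- 					coco_overlap = coco_end-coco_start
-- 					if coco_overlap>0:
-- 						common_are_adaptor += coco_overlap
--
-- 	ada_unique = sum( [ aa[1]-aa[0] for aa in Pa ]) - common_are_adaptor
-- 	return ( Rgap_len - common, common, Tgap_len - common, common_are_adaptor, ada_unique )
-- ===== SOURCE B (Python) =====
-- def calc_uniq(Rl, Rc, Tl, Tp, Pa):
--     # Sweep line over delta events: common = sum over x of cntT(x)*cntR(x),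
--     # adaptor overlap = sum over x of cntT(x)*cntR(x)*cntP(x).
--     events = []  # (coordinate, dT, dR, dP)
--     Rgap_len = 0
--     n = 0
--     cur = 0
--     for ch in Rc:
--         if ch.isdigit():
--             n = n * 10 + int(ch)
--         else:
--             if ch == 'S':
--                 Rgap_len += n
--                 if n > 0:
--                     events.append((cur, 0, 1, 0))
--                     events.append((cur + n, 0, -1, 0))
--             if ch in ('S', 'M', 'I'):
--                 cur += n
--             n = 0
--     Tgap_len = 0
--     if Tp > 0:
--         Tgap_len += Tp
--         events.append((0, 1, 0, 0))
--         events.append((Tp, -1, 0, 0))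
--     if Tp + Tl < Rl:
--         Tgap_len += Rl - (Tp + Tl)
--         events.append((Tp + Tl, 1, 0, 0))
--         events.append((Rl, -1, 0, 0))
--     ada_total = 0
--     for p in Pa:
--         ada_total += p[1] - p[0]
--         if p[1] > p[0]:
--             events.append((p[0], 0, 0, 1))
--             events.append((p[1], 0, 0, -1))
--     events.sort(key=lambda e: e[0])
--     common = 0
--     caa = 0
--     cT = cR = cP = 0
--     prev = 0
--     for x, dT, dR, dP in events:
--         seg = x - prev
--         common += seg * cT * cR
--         caa += seg * cT * cR * cP
--         cT += dT
--         cR += dR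
--         cP += dP
--         prev = x
--     return (Rgap_len - common, common, Tgap_len - common, caa, ada_total - caa)
-- ===== Notes on version B (the rewrite author's own statement) =====
-- stated objective: alternative
-- what changed: B replaces A's nested pairwise interval-intersection loops (each soft-clip gap against each trim gap, then each adaptor interval against each positive intersection) by a sweep line: it emits +1/-1 delta events for the clip, trim and adaptor tracks, sorts them by coordinate, and accumulates common and adaptor overlap as sums of segment-length times products of the three running counts.
import Mathlib
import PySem

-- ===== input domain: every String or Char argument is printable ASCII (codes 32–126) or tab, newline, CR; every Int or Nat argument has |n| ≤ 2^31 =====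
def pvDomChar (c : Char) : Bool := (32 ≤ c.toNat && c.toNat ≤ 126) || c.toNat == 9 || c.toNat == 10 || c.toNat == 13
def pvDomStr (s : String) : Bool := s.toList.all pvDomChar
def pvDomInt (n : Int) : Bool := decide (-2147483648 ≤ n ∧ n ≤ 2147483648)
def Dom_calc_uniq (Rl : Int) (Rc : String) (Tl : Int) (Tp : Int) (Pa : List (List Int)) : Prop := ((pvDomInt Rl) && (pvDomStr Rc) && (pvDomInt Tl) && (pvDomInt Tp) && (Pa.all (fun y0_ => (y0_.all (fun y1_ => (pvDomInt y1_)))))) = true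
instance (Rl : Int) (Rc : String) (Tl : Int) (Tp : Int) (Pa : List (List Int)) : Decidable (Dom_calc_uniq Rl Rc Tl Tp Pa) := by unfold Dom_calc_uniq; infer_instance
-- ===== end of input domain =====

-- B replaces A's nested pairwise interval-overlap loops by a sorted sweep line over
-- coordinate delta events (objective: alternative algorithm; no speed claim).

-- ===== PORT A =====
-- the body of A's character loop, state (Rgaps, Rgap_len, tmpi, Rcur)
def pvAStep (st : List (Int × Int) × Int × Int × Int) (ch : Char) :
    List (Int × Int) × Int × Int × Int :=
  if ch.isDigit then
    (st.1, st.2.1, st.2.2.1 * 10 + ((ch.toNat : Int) - 48), st.2.2.2)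
  else
    let Rgaps := if ch = 'S' then st.1 ++ [(st.2.2.2, st.2.2.2 + st.2.2.1)] else st.1
    let Rgap_len := if ch = 'S' then st.2.1 + st.2.2.1 else st.2.1
    let Rcur := if ch = 'S' || ch = 'M' || ch = 'I' then st.2.2.2 + st.2.2.1 else st.2.2.2
    (Rgaps, Rgap_len, 0, Rcur)

-- the body of A's 'for pure_gap in Pa' loop
def pvAPaStep (cs ce : Int) (caa : Int) (pure_gap : List Int) : Int :=
  let coco_start := max (pure_gap.getD 0 0) cs
  let coco_end := min (pure_gap.getD 1 0) ce
  let coco_overlap := coco_end - coco_start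
  if coco_overlap > 0 then caa + coco_overlap else caa

-- the body of A's 'for Tgap in Tgaps' loop, state (common, common_are_adaptor)
def pvATStep (Pa : List (List Int)) (Rgap : Int × Int) (acc : Int × Int) (Tgap : Int × Int) :
    Int × Int :=
  let common_end := min Rgap.2 Tgap.2
  let common_start := max Rgap.1 Tgap.1
  let overlap := common_end - common_start
  if overlap > 0 then
    (acc.1 + overlap, Pa.foldl (pvAPaStep common_start common_end) acc.2)
  else acc

def calc_uniq (Rl : Int) (Rc : String) (Tl : Int) (Tp : Int) (Pa : List (List Int)) : List Int :=
  let st := Rc.toList.foldl pvAStep ([], 0, 0, 0)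
  let Rgaps := st.1
  let Rgap_len := st.2.1
  let tg0 : List (Int × Int) × Int := if Tp > 0 then ([(0, Tp)], Tp) else ([], 0)
  let tg : List (Int × Int) × Int :=
    if Tp + Tl < Rl then (tg0.1 ++ [(Tp + Tl, Rl)], tg0.2 + (Rl - (Tp + Tl))) else tg0
  let Tgaps := tg.1
  let Tgap_len := tg.2
  let cc := Rgaps.foldl (fun acc Rgap => Tgaps.foldl (pvATStep Pa Rgap) acc) ((0 : Int), (0 : Int))
  let common := cc.1
  let common_are_adaptor := cc.2
  let ada_unique := (Pa.map (fun aa => aa.getD 1 0 - aa.getD 0 0)).sum - common_are_adaptor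
  [Rgap_len - common, common, Tgap_len - common, common_are_adaptor, ada_unique]

-- ===== PORT B =====
-- an event is (coordinate, dT, dR, dP)
-- B's CIGAR loop: state (events, Rgap_len, n, cur); a soft clip of positive length
-- emits an opening and a closing R-track event
def pvBStep (st : List (Int × Int × Int × Int) × Int × Int × Int) (ch : Char) :
    List (Int × Int × Int × Int) × Int × Int × Int :=
  if ch.isDigit then
    (st.1, st.2.1, st.2.2.1 * 10 + ((ch.toNat : Int) - 48), st.2.2.2)
  else
    let events := if ch = 'S' then
        (if 0 < st.2.2.1 then
          st.1 ++ [(st.2.2.2, 0, 1, 0), (st.2.2.2 + st.2.2.1, 0, -1, 0)] else st.1)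
      else st.1
    let rlen := if ch = 'S' then st.2.1 + st.2.2.1 else st.2.1
    let cur := if ch = 'S' || ch = 'M' || ch = 'I' then st.2.2.2 + st.2.2.1 else st.2.2.2
    (events, rlen, 0, cur)

-- B's 'for p in Pa' loop: state (events, ada_total)
def pvPaEv (st : List (Int × Int × Int × Int) × Int) (p : List Int) :
    List (Int × Int × Int × Int) × Int :=
  (st.1 ++ (if p.getD 0 0 < p.getD 1 0 then
      [(p.getD 0 0, 0, 0, 1), (p.getD 1 0, 0, 0, -1)] else []),
   st.2 + (p.getD 1 0 - p.getD 0 0))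

-- B's sweep state
structure pvSw where
  common : Int
  caa : Int
  cT : Int
  cR : Int
  cP : Int
  prev : Int
deriving Repr, DecidableEq

-- one sweep step: add the segment contributions, then apply the deltas
def pvSweepStep (st : pvSw) (e : Int × Int × Int × Int) : pvSw :=
  let seg := e.1 - st.prev
  { common := st.common + seg * st.cT * st.cR,
    caa := st.caa + seg * st.cT * st.cR * st.cP,
    cT := st.cT + e.2.1, cR := st.cR + e.2.2.1, cP := st.cP + e.2.2.2, prev := e.1 }

def calc_uniq_alt (Rl : Int) (Rc : String) (Tl : Int) (Tp : Int) (Pa : List (List Int)) : List Int :=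
  let ps := Rc.toList.foldl pvBStep ([], 0, 0, 0)
  let Rgap_len := ps.2.1
  let ev1 := ps.1 ++ (if Tp > 0 then [((0 : Int), (1 : Int), (0 : Int), (0 : Int)), (Tp, -1, 0, 0)] else [])
  let ev2 := ev1 ++ (if Tp + Tl < Rl then [(Tp + Tl, (1 : Int), (0 : Int), (0 : Int)), (Rl, -1, 0, 0)] else [])
  let Tgap_len := (if Tp > 0 then Tp else 0) + (if Tp + Tl < Rl then Rl - (Tp + Tl) else 0)
  let pa := Pa.foldl pvPaEv (ev2, 0)
  let events := PySem.List.sorted pa.1 (fun e => e.1) false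
  let sw := events.foldl pvSweepStep ⟨0, 0, 0, 0, 0, 0⟩
  [Rgap_len - sw.common, sw.common, Tgap_len - sw.common, sw.caa, pa.2 - sw.caa]

-- ===== PRECONDITION & SPEC =====
-- Pre_ excludes exactly the inputs where Python A raises IndexError: some adaptor
-- interval in Pa has fewer than two entries (A always indexes p[0] and p[1]).
def Pre_calc_uniq (Rl : Int) (Rc : String) (Tl : Int) (Tp : Int) (Pa : List (List Int)) : Prop :=
  ∀ p ∈ Pa, 2 ≤ p.length
instance (Rl : Int) (Rc : String) (Tl : Int) (Tp : Int) (Pa : List (List Int)) : Decidable (Pre_calc_uniq Rl Rc Tl Tp Pa) := by unfold Pre_calc_uniq; infer_instance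

def pvWitness_calc_uniq : Int × String × Int × Int × List (List Int) :=
  (10, "3S4M3S", 4, 2, [[0, 3], [8, 10]])

def Spec_calc_uniq (Rl : Int) (Rc : String) (Tl : Int) (Tp : Int) (Pa : List (List Int)) (out : List Int) : Prop := out = calc_uniq_alt Rl Rc Tl Tp Pa
instance (Rl : Int) (Rc : String) (Tl : Int) (Tp : Int) (Pa : List (List Int)) (out : List Int) : Decidable (Spec_calc_uniq Rl Rc Tl Tp Pa out) := by unfold Spec_calc_uniq; infer_instance

-- ===== CLAIM (what is proved, stated in full; the proofs are below) =====
def Claim_equal_calc_uniq : Prop := ∀ (Rl : Int) (Rc : String) (Tl : Int) (Tp : Int) (Pa : List (List Int)), Dom_calc_uniq Rl Rc Tl Tp Pa → Pre_calc_uniq Rl Rc Tl Tp Pa → Spec_calc_uniq Rl Rc Tl Tp Pa (calc_uniq Rl Rc Tl Tp Pa)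

-- ===== LEMMAS AND PROOFS =====

-- positive part, pairwise overlap, triple overlap (exactly the quantities A accumulates)
def pvPos (n : Int) : Int := if 0 < n then n else 0
def pvOv (r t : Int × Int) : Int := pvPos (min r.2 t.2 - max r.1 t.1)
def pvTripP (r t p : Int × Int) : Int := pvPos (min p.2 (min r.2 t.2) - max p.1 (max r.1 t.1))

-- events of one interval list on one track (u = the delta triple of an opening event)
def pvEvs (L : List (Int × Int)) (u : Int × Int × Int) : List (Int × Int × Int × Int) :=
  L.flatMap (fun r => [(r.1, u.1, u.2.1, u.2.2), (r.2, -u.1, -u.2.1, -u.2.2)])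

def pvSelT (e : Int × Int × Int × Int) : Int := e.2.1
def pvSelR (e : Int × Int × Int × Int) : Int := e.2.2.1
def pvSelP (e : Int × Int × Int × Int) : Int := e.2.2.2

-- running count of a track at coordinate x (events with coordinate ≤ x applied)
def pvCnt (sel : (Int × Int × Int × Int) → Int) (E : List (Int × Int × Int × Int)) (x : Int) : Int :=
  (E.map (fun e => if e.1 ≤ x then sel e else 0)).sum
def pvTot (sel : (Int × Int × Int × Int) → Int) (E : List (Int × Int × Int × Int)) : Int :=
  (E.map sel).sum

-- 0/1 indicator of x ∈ [a.1, a.2)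
def pvInd (a : Int × Int) (x : Int) : Int := if a.1 ≤ x ∧ x < a.2 then 1 else 0


-- ---------- A-side reductions: A's loops as sums of pvOv / pvTripP ----------

theorem pvAPaStep_eq (cs ce a : Int) (pg : List Int) :
    pvAPaStep cs ce a pg = a + pvPos (min (pg.getD 1 0) ce - max (pg.getD 0 0) cs) := by
  simp only [pvAPaStep, pvPos]
  split_ifs <;> omega

theorem pvPaFold_eq (Pa : List (List Int)) (cs ce a : Int) :
    Pa.foldl (pvAPaStep cs ce) a
      = a + (Pa.map (fun p => pvPos (min (p.getD 1 0) ce - max (p.getD 0 0) cs))).sum := by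
  induction Pa generalizing a with
  | nil => simp
  | cons pg Pa ih =>
    rw [List.foldl_cons, pvAPaStep_eq, ih]
    simp only [List.map_cons, List.sum_cons]
    ring

theorem pvATStep_eq (Pa : List (List Int)) (Rg : Int × Int) (acc : Int × Int) (Tg : Int × Int) :
    pvATStep Pa Rg acc Tg =
      (acc.1 + pvOv Rg Tg,
       acc.2 + (Pa.map (fun p => pvTripP Rg Tg (p.getD 0 0, p.getD 1 0))).sum) := by
  simp only [pvATStep]
  by_cases h : 0 < min Rg.2 Tg.2 - max Rg.1 Tg.1
  · rw [if_pos (by omega : min Rg.2 Tg.2 - max Rg.1 Tg.1 > 0), pvPaFold_eq]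
    have h1 : pvOv Rg Tg = min Rg.2 Tg.2 - max Rg.1 Tg.1 := by
      simp only [pvOv, pvPos]; rw [if_pos h]
    rw [h1]
    rfl
  · rw [if_neg (by omega : ¬ min Rg.2 Tg.2 - max Rg.1 Tg.1 > 0)]
    have h1 : pvOv Rg Tg = 0 := by simp only [pvOv, pvPos]; rw [if_neg h]
    have h2 : (Pa.map (fun p => pvTripP Rg Tg (p.getD 0 0, p.getD 1 0))).sum = 0 := by
      apply List.sum_eq_zero
      intro y hy
      simp only [List.mem_map] at hy
      obtain ⟨p, _, rfl⟩ := hy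
      simp only [pvTripP, pvPos]
      split_ifs with hx
      · simp only at hx; omega
      · rfl
    rw [h1, h2]
    simp

theorem pvInnerFold_eq (Pa : List (List Int)) (Tgaps : List (Int × Int)) (Rg : Int × Int)
    (acc : Int × Int) :
    Tgaps.foldl (pvATStep Pa Rg) acc =
      (acc.1 + (Tgaps.map (fun t => pvOv Rg t)).sum,
       acc.2 + (Tgaps.map (fun t =>
         (Pa.map (fun p => pvTripP Rg t (p.getD 0 0, p.getD 1 0))).sum)).sum) := by
  induction Tgaps generalizing acc with
  | nil => simp
  | cons Tg Tgaps ih =>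
    rw [List.foldl_cons, pvATStep_eq, ih]
    simp only [List.map_cons, List.sum_cons, Prod.mk.injEq]
    constructor <;> ring

theorem pvOuterFold_eq (Pa : List (List Int)) (Rgaps Tgaps : List (Int × Int)) (acc : Int × Int) :
    Rgaps.foldl (fun a Rg => Tgaps.foldl (pvATStep Pa Rg) a) acc =
      (acc.1 + (Rgaps.map (fun r => (Tgaps.map (fun t => pvOv r t)).sum)).sum,
       acc.2 + (Rgaps.map (fun r => (Tgaps.map (fun t =>
         (Pa.map (fun p => pvTripP r t (p.getD 0 0, p.getD 1 0))).sum)).sum)).sum) := by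
  induction Rgaps generalizing acc with
  | nil => simp
  | cons Rg Rgaps ih =>
    rw [List.foldl_cons, pvInnerFold_eq, ih]
    simp only [List.map_cons, List.sum_cons, Prod.mk.injEq]
    constructor <;> ring

-- ---------- B-side: the event lists B builds, as pvEvs of interval lists ----------

def pvEvR (g : List (Int × Int)) : List (Int × Int × Int × Int) :=
  pvEvs (g.filter (fun r => decide (r.1 < r.2))) (0, 1, 0)

theorem pvEvR_append_one (g : List (Int × Int)) (a b : Int) :
    pvEvR (g ++ [(a, b)])
      = pvEvR g ++ (if a < b then [(a, 0, 1, 0), (b, 0, -1, 0)] else []) := by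
  simp only [pvEvR, pvEvs, List.filter_append, List.flatMap_append]
  by_cases h : a < b <;> simp [h]

theorem pvParse_eq (cs : List Char) : ∀ (g : List (Int × Int)) (len t p : Int),
    cs.foldl pvBStep (pvEvR g, len, t, p) =
      (pvEvR (cs.foldl pvAStep (g, len, t, p)).1,
       (cs.foldl pvAStep (g, len, t, p)).2.1,
       (cs.foldl pvAStep (g, len, t, p)).2.2.1,
       (cs.foldl pvAStep (g, len, t, p)).2.2.2) := by
  induction cs with
  | nil => intro g len t p; rfl
  | cons c cs ih =>
    intro g len t p
    simp only [List.foldl_cons]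
    by_cases h : c.isDigit
    · have eA : pvAStep (g, len, t, p) c = (g, len, t * 10 + ((c.toNat : Int) - 48), p) := by
        simp only [pvAStep, if_pos h]
      have eB : pvBStep (pvEvR g, len, t, p) c
          = (pvEvR g, len, t * 10 + ((c.toNat : Int) - 48), p) := by
        simp only [pvBStep, if_pos h]
      rw [eA, eB]
      exact ih g len _ p
    · have eA : pvAStep (g, len, t, p) c =
          ((if c = 'S' then g ++ [(p, p + t)] else g),
           (if c = 'S' then len + t else len), 0,
           (if c = 'S' || c = 'M' || c = 'I' then p + t else p)) := by
        simp only [pvAStep, if_neg h]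
      have eB : pvBStep (pvEvR g, len, t, p) c =
          (pvEvR (if c = 'S' then g ++ [(p, p + t)] else g),
           (if c = 'S' then len + t else len), 0,
           (if c = 'S' || c = 'M' || c = 'I' then p + t else p)) := by
        simp only [pvBStep, if_neg h]
        by_cases hS : c = 'S'
        · simp only [if_pos hS, pvEvR_append_one]
          by_cases ht : 0 < t
          · rw [if_pos ht, if_pos (by omega : p < p + t)]
          · rw [if_neg ht, if_neg (by omega : ¬ p < p + t), List.append_nil]
        · simp only [if_neg hS]
      rw [eA, eB]
      exact ih _ _ 0 _

theorem pvTEvs (Tp Tl Rl : Int) :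
    (if Tp > 0 then [((0 : Int), (1 : Int), (0 : Int), (0 : Int)), (Tp, -1, 0, 0)] else []) ++
    (if Tp + Tl < Rl then [(Tp + Tl, (1 : Int), (0 : Int), (0 : Int)), (Rl, -1, 0, 0)] else [])
      = pvEvs ((if Tp > 0 then [((0 : Int), Tp)] else [])
               ++ (if Tp + Tl < Rl then [(Tp + Tl, Rl)] else [])) (1, 0, 0) := by
  by_cases h1 : Tp > 0 <;> by_cases h2 : Tp + Tl < Rl <;> simp [h1, h2, pvEvs]


theorem pvPaEvFold (Pa : List (List Int)) : ∀ (ev : List (Int × Int × Int × Int)) (s : Int),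
    Pa.foldl pvPaEv (ev, s) =
      (ev ++ pvEvs (((Pa.map (fun p => (p.getD 0 0, p.getD 1 0))).filter
                       (fun q => decide (q.1 < q.2)))) (0, 0, 1),
       s + (Pa.map (fun p => p.getD 1 0 - p.getD 0 0)).sum) := by
  induction Pa with
  | nil => intro ev s; simp [pvEvs]
  | cons p Pa ih =>
    intro ev s
    rw [List.foldl_cons]
    simp only [pvPaEv]
    rw [ih]
    simp only [List.map_cons, List.filter_cons, List.sum_cons]
    by_cases h : p.getD 0 0 < p.getD 1 0
    · simp only [if_pos h, decide_eq_true_eq, h, if_pos, pvEvs, List.flatMap_cons, Prod.mk.injEq]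
      refine ⟨by simp [List.append_assoc], by ring⟩
    · simp only [if_neg h, decide_eq_true_eq, h, pvEvs, Prod.mk.injEq]
      refine ⟨by simp, by ring⟩


-- ---------- counting algebra for event lists ----------

theorem pvCnt_append (sel : (Int × Int × Int × Int) → Int) (E1 E2 : List (Int × Int × Int × Int))
    (x : Int) : pvCnt sel (E1 ++ E2) x = pvCnt sel E1 x + pvCnt sel E2 x := by
  simp [pvCnt]

theorem pvTot_append (sel : (Int × Int × Int × Int) → Int) (E1 E2 : List (Int × Int × Int × Int)) :
    pvTot sel (E1 ++ E2) = pvTot sel E1 + pvTot sel E2 := by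
  simp [pvTot]

theorem pvCnt_perm (sel : (Int × Int × Int × Int) → Int) {E1 E2 : List (Int × Int × Int × Int)}
    (h : E1.Perm E2) (x : Int) : pvCnt sel E1 x = pvCnt sel E2 x :=
  (h.map _).sum_eq

theorem pvTot_perm (sel : (Int × Int × Int × Int) → Int) {E1 E2 : List (Int × Int × Int × Int)}
    (h : E1.Perm E2) : pvTot sel E1 = pvTot sel E2 :=
  (h.map _).sum_eq

theorem pvCnt_sel_zero (sel : (Int × Int × Int × Int) → Int) (E : List (Int × Int × Int × Int))
    (x : Int) (h : ∀ e ∈ E, sel e = 0) : pvCnt sel E x = 0 := by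
  apply List.sum_eq_zero
  intro y hy
  simp only [List.mem_map] at hy
  obtain ⟨e, he, rfl⟩ := hy
  rw [h e he]
  simp

theorem pvCnt_all_gt (sel : (Int × Int × Int × Int) → Int) (E : List (Int × Int × Int × Int))
    (y : Int) (h : ∀ e ∈ E, y < e.1) : pvCnt sel E y = 0 := by
  apply List.sum_eq_zero
  intro z hz
  simp only [List.mem_map] at hz
  obtain ⟨e, he, rfl⟩ := hz
  rw [if_neg (by have := h e he; omega)]

theorem pvCnt_cons (sel : (Int × Int × Int × Int) → Int) (e : Int × Int × Int × Int)
    (E : List (Int × Int × Int × Int)) (y : Int) :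
    pvCnt sel (e :: E) y = (if e.1 ≤ y then sel e else 0) + pvCnt sel E y := by
  simp [pvCnt]

theorem pvTot_cons (sel : (Int × Int × Int × Int) → Int) (e : Int × Int × Int × Int)
    (E : List (Int × Int × Int × Int)) :
    pvTot sel (e :: E) = sel e + pvTot sel E := by
  simp [pvTot]

theorem pvEvs_sel (L : List (Int × Int)) (u : Int × Int × Int) (e : Int × Int × Int × Int)
    (he : e ∈ pvEvs L u) : e.2 = u ∨ e.2 = (-u.1, -u.2.1, -u.2.2) := by
  simp only [pvEvs, List.mem_flatMap] at he
  obtain ⟨r, _, hr⟩ := he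
  simp only [List.mem_cons, List.mem_singleton] at hr
  rcases hr with h | h | h
  · left; rw [h]
  · right; rw [h]
  · exact absurd h (by simp)

theorem pvEvs_mem_endpoints (L : List (Int × Int)) (u : Int × Int × Int) (r : Int × Int)
    (hr : r ∈ L) :
    (r.1, u.1, u.2.1, u.2.2) ∈ pvEvs L u ∧ (r.2, -u.1, -u.2.1, -u.2.2) ∈ pvEvs L u := by
  constructor <;> (simp only [pvEvs, List.mem_flatMap]; exact ⟨r, hr, by simp⟩)

theorem pvTot_evs (L : List (Int × Int)) (u : Int × Int × Int)
    (sel : (Int × Int × Int × Int) → Int)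
    (h : ∀ c d : Int, sel (c, u.1, u.2.1, u.2.2) + sel (d, -u.1, -u.2.1, -u.2.2) = 0) :
    pvTot sel (pvEvs L u) = 0 := by
  induction L with
  | nil => simp [pvTot, pvEvs]
  | cons r L ih =>
    have : pvEvs (r :: L) u
        = (r.1, u.1, u.2.1, u.2.2) :: (r.2, -u.1, -u.2.1, -u.2.2) :: pvEvs L u := by
      simp [pvEvs]
    rw [this, pvTot_cons, pvTot_cons, ih]
    have := h r.1 r.2
    omega

theorem pvCnt_evs (L : List (Int × Int)) (u : Int × Int × Int)
    (sel : (Int × Int × Int × Int) → Int) (x : Int)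
    (hL : ∀ r ∈ L, r.1 ≤ r.2)
    (ho : ∀ c : Int, sel (c, u.1, u.2.1, u.2.2) = 1)
    (hc : ∀ c : Int, sel (c, -u.1, -u.2.1, -u.2.2) = -1) :
    pvCnt sel (pvEvs L u) x = (L.map (fun r => pvInd r x)).sum := by
  induction L with
  | nil => simp [pvCnt, pvEvs]
  | cons r L ih =>
    have hcons : pvEvs (r :: L) u
        = (r.1, u.1, u.2.1, u.2.2) :: (r.2, -u.1, -u.2.1, -u.2.2) :: pvEvs L u := by
      simp [pvEvs]
    rw [hcons, pvCnt_cons, pvCnt_cons, ih (fun a ha => hL a (List.mem_cons_of_mem _ ha))]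
    simp only [List.map_cons, List.sum_cons, ho, hc]
    have hr := hL r (List.mem_cons_self ..)
    have : (if r.1 ≤ x then (1 : Int) else 0) + (if r.2 ≤ x then (-1 : Int) else 0)
        = pvInd r x := by
      simp only [pvInd]
      split_ifs <;> omega
    omega

-- ---------- the sweep loop computes an Ico-sum of count products ----------

theorem pvFoldrMin_le (E : List (Int × Int × Int × Int)) (z : Int) :
    ∀ e ∈ E, E.foldr (fun e m => min e.1 m) z ≤ e.1 := by
  induction E with
  | nil => simp
  | cons a E ih =>
    intro e he
    rcases List.mem_cons.mp he with h | h
    · subst h; simp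
    · exact le_trans (by simp) (ih e h)

theorem pvLe_foldrMax (E : List (Int × Int × Int × Int)) (z : Int) :
    ∀ e ∈ E, e.1 ≤ E.foldr (fun e m => max e.1 m) z := by
  induction E with
  | nil => simp
  | cons a E ih =>
    intro e he
    rcases List.mem_cons.mp he with h | h
    · subst h; simp
    · exact le_trans (ih e h) (by simp)

theorem pvSweep_shift (E : List (Int × Int × Int × Int)) (c k prev prev' : Int) :
    (E.foldl pvSweepStep ⟨c, k, 0, 0, 0, prev⟩).common
        = (E.foldl pvSweepStep ⟨c, k, 0, 0, 0, prev'⟩).common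
    ∧ (E.foldl pvSweepStep ⟨c, k, 0, 0, 0, prev⟩).caa
        = (E.foldl pvSweepStep ⟨c, k, 0, 0, 0, prev'⟩).caa := by
  cases E with
  | nil => exact ⟨rfl, rfl⟩
  | cons e E =>
    simp only [List.foldl_cons, pvSweepStep]
    norm_num

theorem pvSweep_eq : ∀ (E : List (Int × Int × Int × Int)),
    E.Pairwise (fun a b => a.1 ≤ b.1) →
    ∀ (c k cT cR cP prev hi : Int), (∀ e ∈ E, prev ≤ e.1 ∧ e.1 ≤ hi) →
    cT + pvTot pvSelT E = 0 → cR + pvTot pvSelR E = 0 → cP + pvTot pvSelP E = 0 →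
    (E.foldl pvSweepStep ⟨c, k, cT, cR, cP, prev⟩).common
        = c + ∑ x ∈ Finset.Ico prev hi,
            (cT + pvCnt pvSelT E x) * (cR + pvCnt pvSelR E x)
    ∧ (E.foldl pvSweepStep ⟨c, k, cT, cR, cP, prev⟩).caa
        = k + ∑ x ∈ Finset.Ico prev hi,
            (cT + pvCnt pvSelT E x) * (cR + pvCnt pvSelR E x) * (cP + pvCnt pvSelP E x) := by
  intro E
  induction E with
  | nil =>
    intro _ c k cT cR cP prev hi _ hT hR hP
    have hT0 : cT = 0 := by simpa [pvTot] using hT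
    have hR0 : cR = 0 := by simpa [pvTot] using hR
    simp [pvCnt, hT0, hR0]
  | cons e E ih =>
    intro hpw c k cT cR cP prev hi hb hT hR hP
    obtain ⟨x, dT, dR, dP⟩ := e
    have hpw' := (List.pairwise_cons.mp hpw).2
    have hx := (List.pairwise_cons.mp hpw).1
    have hpx : prev ≤ x := (hb _ (List.mem_cons_self ..)).1
    have hxhi : x ≤ hi := (hb _ (List.mem_cons_self ..)).2
    have hb' : ∀ e ∈ E, x ≤ e.1 ∧ e.1 ≤ hi :=
      fun e he => ⟨hx e he, (hb e (List.mem_cons_of_mem _ he)).2⟩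
    have step : List.foldl pvSweepStep ⟨c, k, cT, cR, cP, prev⟩ ((x, dT, dR, dP) :: E)
        = List.foldl pvSweepStep
            ⟨c + (x - prev) * cT * cR, k + (x - prev) * cT * cR * cP,
             cT + dT, cR + dR, cP + dP, x⟩ E := by
      simp [pvSweepStep]
    have hT' : cT + dT + pvTot pvSelT E = 0 := by
      rw [pvTot_cons] at hT; simp only [pvSelT] at hT ⊢; omega
    have hR' : cR + dR + pvTot pvSelR E = 0 := by
      rw [pvTot_cons] at hR; simp only [pvSelR] at hR ⊢; omega
    have hP' : cP + dP + pvTot pvSelP E = 0 := by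
      rw [pvTot_cons] at hP; simp only [pvSelP] at hP ⊢; omega
    obtain ⟨ihc, ihk⟩ := ih hpw' (c + (x - prev) * cT * cR) (k + (x - prev) * cT * cR * cP)
      (cT + dT) (cR + dR) (cP + dP) x hi hb' hT' hR' hP'
    -- the left segment [prev, x): all counts are still the initial ones
    have hleft : ∀ (sel : (Int × Int × Int × Int) → Int) (y : Int), y ∈ Finset.Ico prev x →
        pvCnt sel ((x, dT, dR, dP) :: E) y = 0 := by
      intro sel y hy
      rw [Finset.mem_Ico] at hy
      apply pvCnt_all_gt
      intro e he
      rcases List.mem_cons.mp he with h | h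
      · rw [h]; exact hy.2
      · exact lt_of_lt_of_le hy.2 (hx e h)
    have hright : ∀ (sel : (Int × Int × Int × Int) → Int) (d : Int),
        sel (x, dT, dR, dP) = d → ∀ y ∈ Finset.Ico x hi,
        pvCnt sel ((x, dT, dR, dP) :: E) y = d + pvCnt sel E y := by
      intro sel d hd y hy
      rw [Finset.mem_Ico] at hy
      rw [pvCnt_cons, if_pos hy.1, hd]
    constructor
    · rw [step, ihc]
      rw [← Finset.Ico_union_Ico_eq_Ico hpx hxhi,
        Finset.sum_union (Finset.Ico_disjoint_Ico_consecutive prev x hi)]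
      have e1 : ∑ y ∈ Finset.Ico prev x,
          (cT + pvCnt pvSelT ((x, dT, dR, dP) :: E) y) * (cR + pvCnt pvSelR ((x, dT, dR, dP) :: E) y)
          = (x - prev) * cT * cR := by
        rw [Finset.sum_congr rfl (fun y hy => by
          rw [hleft pvSelT y hy, hleft pvSelR y hy, add_zero, add_zero])]
        rw [Finset.sum_const, Int.card_Ico, nsmul_eq_mul,
          Int.toNat_of_nonneg (by omega)]
        ring
      have e2 : ∑ y ∈ Finset.Ico x hi,
          (cT + pvCnt pvSelT ((x, dT, dR, dP) :: E) y) * (cR + pvCnt pvSelR ((x, dT, dR, dP) :: E) y)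
          = ∑ y ∈ Finset.Ico x hi, (cT + dT + pvCnt pvSelT E y) * (cR + dR + pvCnt pvSelR E y) := by
        apply Finset.sum_congr rfl
        intro y hy
        rw [hright pvSelT dT rfl y hy, hright pvSelR dR rfl y hy]
        ring_nf
      rw [e1, e2]
      ring
    · rw [step, ihk]
      rw [← Finset.Ico_union_Ico_eq_Ico hpx hxhi,
        Finset.sum_union (Finset.Ico_disjoint_Ico_consecutive prev x hi)]
      have e1 : ∑ y ∈ Finset.Ico prev x,
          (cT + pvCnt pvSelT ((x, dT, dR, dP) :: E) y) * (cR + pvCnt pvSelR ((x, dT, dR, dP) :: E) y)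
            * (cP + pvCnt pvSelP ((x, dT, dR, dP) :: E) y)
          = (x - prev) * cT * cR * cP := by
        rw [Finset.sum_congr rfl (fun y hy => by
          rw [hleft pvSelT y hy, hleft pvSelR y hy, hleft pvSelP y hy])]
        rw [Finset.sum_const, Int.card_Ico, nsmul_eq_mul,
          Int.toNat_of_nonneg (by omega)]
        ring
      have e2 : ∑ y ∈ Finset.Ico x hi,
          (cT + pvCnt pvSelT ((x, dT, dR, dP) :: E) y) * (cR + pvCnt pvSelR ((x, dT, dR, dP) :: E) y)
            * (cP + pvCnt pvSelP ((x, dT, dR, dP) :: E) y)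
          = ∑ y ∈ Finset.Ico x hi, (cT + dT + pvCnt pvSelT E y) * (cR + dR + pvCnt pvSelR E y)
              * (cP + dP + pvCnt pvSelP E y) := by
        apply Finset.sum_congr rfl
        intro y hy
        rw [hright pvSelT dT rfl y hy, hright pvSelR dR rfl y hy, hright pvSelP dP rfl y hy]
        ring_nf
      rw [e1, e2]
      ring


-- ---------- Ico-sums of indicators are overlap lengths ----------

theorem pvSum_ind (lo hi : Int) (a : Int × Int) (h : a.1 < a.2 → lo ≤ a.1 ∧ a.2 ≤ hi) :
    (∑ x ∈ Finset.Ico lo hi, pvInd a x) = pvPos (a.2 - a.1) := by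
  by_cases hp : a.1 < a.2
  · obtain ⟨h1, h2⟩ := h hp
    have hsub : Finset.Ico a.1 a.2 ⊆ Finset.Ico lo hi := Finset.Ico_subset_Ico h1 h2
    have e1 : (∑ x ∈ Finset.Ico lo hi, pvInd a x) = ∑ x ∈ Finset.Ico a.1 a.2, pvInd a x := by
      refine (Finset.sum_subset hsub ?_).symm
      intro x hx hnx
      rw [Finset.mem_Ico] at hx
      simp only [Finset.mem_Ico, not_and, not_lt] at hnx
      simp only [pvInd]
      rw [if_neg (by intro hc; omega)]
    have e2 : (∑ x ∈ Finset.Ico a.1 a.2, pvInd a x) = ∑ _x ∈ Finset.Ico a.1 a.2, (1 : Int) := by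
      refine Finset.sum_congr rfl ?_
      intro x hx
      rw [Finset.mem_Ico] at hx
      simp only [pvInd]
      rw [if_pos hx]
    rw [e1, e2, Finset.sum_const, Int.card_Ico, nsmul_eq_mul, Int.toNat_of_nonneg (by omega)]
    simp only [pvPos]
    rw [if_pos (by omega)]
    ring
  · have e0 : (∑ x ∈ Finset.Ico lo hi, pvInd a x) = ∑ _x ∈ Finset.Ico lo hi, (0 : Int) := by
      refine Finset.sum_congr rfl ?_
      intro x _
      simp only [pvInd]
      rw [if_neg (by intro hc; omega)]
    rw [e0]
    simp only [Finset.sum_const, pvPos, smul_zero]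
    rw [if_neg (by omega)]

theorem pvInd_mul2 (t r : Int × Int) (x : Int) :
    pvInd t x * pvInd r x = pvInd (max t.1 r.1, min t.2 r.2) x := by
  simp only [pvInd]
  split_ifs <;> omega

theorem pvInd_mul3 (r t p : Int × Int) (x : Int) :
    pvInd p x * (pvInd t x * pvInd r x)
      = pvInd (max p.1 (max r.1 t.1), min p.2 (min r.2 t.2)) x := by
  simp only [pvInd]
  split_ifs <;> omega

-- expanding a product (list-sum of indicators) * G over the Ico-sum
theorem pvSumExpand (s : Finset Int) (L : List (Int × Int)) (G : Int → Int) :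
    (∑ x ∈ s, ((L.map (fun a => pvInd a x)).sum * G x))
      = (L.map (fun a => ∑ x ∈ s, pvInd a x * G x)).sum := by
  induction L with
  | nil => simp
  | cons a L ih =>
    simp only [List.map_cons, List.sum_cons, add_mul]
    rw [Finset.sum_add_distrib, ih]

-- double list sums commute
theorem pvSum_comm {α β : Type} (l : List α) (m : List β) (f : α → β → Int) :
    (l.map (fun x => (m.map (f x)).sum)).sum
      = (m.map (fun y => (l.map (fun x => f x y)).sum)).sum := by
  induction l with
  | nil => simp
  | cons x l ih =>
    simp only [List.map_cons, List.sum_cons, ih]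
    rw [PySem.List.sum_map_add_int]

-- ---------- the master theorem: sorted sweep = pairwise / triple overlap sums ----------

theorem pvMaster (R T P : List (Int × Int))
    (hR : ∀ r ∈ R, r.1 < r.2) (hT : ∀ t ∈ T, t.1 < t.2) (hP : ∀ p ∈ P, p.1 < p.2) :
    ((PySem.List.sorted (pvEvs R (0, 1, 0) ++ pvEvs T (1, 0, 0) ++ pvEvs P (0, 0, 1))
        (fun e => e.1) false).foldl pvSweepStep ⟨0, 0, 0, 0, 0, 0⟩).common
      = (R.map (fun r => (T.map (fun t => pvOv r t)).sum)).sum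
    ∧ ((PySem.List.sorted (pvEvs R (0, 1, 0) ++ pvEvs T (1, 0, 0) ++ pvEvs P (0, 0, 1))
        (fun e => e.1) false).foldl pvSweepStep ⟨0, 0, 0, 0, 0, 0⟩).caa
      = (R.map (fun r => (T.map (fun t => (P.map (fun p => pvTripP r t p)).sum)).sum)).sum := by
  set E := pvEvs R (0, 1, 0) ++ pvEvs T (1, 0, 0) ++ pvEvs P (0, 0, 1) with hE
  set Es := PySem.List.sorted E (fun e => e.1) false with hEs
  have hperm : Es.Perm E := PySem.List.sorted_perm E (fun e => e.1) false
  have hpw : Es.Pairwise (fun a b => a.1 ≤ b.1) := PySem.List.sorted_pairwise E (fun e => e.1)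
  set lo := Es.foldr (fun e m => min e.1 m) 0 with hlo
  set hi := Es.foldr (fun e m => max e.1 m) 0 with hhi
  have hb : ∀ e ∈ Es, lo ≤ e.1 ∧ e.1 ≤ hi :=
    fun e he => ⟨pvFoldrMin_le Es 0 e he, pvLe_foldrMax Es 0 e he⟩
  -- totals vanish
  have htotT : pvTot pvSelT Es = 0 := by
    rw [pvTot_perm pvSelT hperm, hE, pvTot_append, pvTot_append]
    rw [pvTot_evs R (0,1,0) pvSelT (by intro c d; norm_num [pvSelT]),
        pvTot_evs T (1,0,0) pvSelT (by intro c d; norm_num [pvSelT]),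
        pvTot_evs P (0,0,1) pvSelT (by intro c d; norm_num [pvSelT])]
    norm_num
  have htotR : pvTot pvSelR Es = 0 := by
    rw [pvTot_perm pvSelR hperm, hE, pvTot_append, pvTot_append]
    rw [pvTot_evs R (0,1,0) pvSelR (by intro c d; norm_num [pvSelR]),
        pvTot_evs T (1,0,0) pvSelR (by intro c d; norm_num [pvSelR]),
        pvTot_evs P (0,0,1) pvSelR (by intro c d; norm_num [pvSelR])]
    norm_num
  have htotP : pvTot pvSelP Es = 0 := by
    rw [pvTot_perm pvSelP hperm, hE, pvTot_append, pvTot_append]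
    rw [pvTot_evs R (0,1,0) pvSelP (by intro c d; norm_num [pvSelP]),
        pvTot_evs T (1,0,0) pvSelP (by intro c d; norm_num [pvSelP]),
        pvTot_evs P (0,0,1) pvSelP (by intro c d; norm_num [pvSelP])]
    norm_num
  -- counts are indicator sums of the right track
  have hcT : ∀ x : Int, pvCnt pvSelT Es x = (T.map (fun t => pvInd t x)).sum := by
    intro x
    rw [pvCnt_perm pvSelT hperm, hE, pvCnt_append, pvCnt_append]
    rw [pvCnt_sel_zero pvSelT (pvEvs R (0,1,0)) x (by
      intro e he
      rcases pvEvs_sel R (0,1,0) e he with h | h <;> simp [pvSelT, h])]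
    rw [pvCnt_sel_zero pvSelT (pvEvs P (0,0,1)) x (by
      intro e he
      rcases pvEvs_sel P (0,0,1) e he with h | h <;> simp [pvSelT, h])]
    rw [pvCnt_evs T (1,0,0) pvSelT x (fun t ht => le_of_lt (hT t ht))
      (by intro c; simp [pvSelT]) (by intro c; simp [pvSelT])]
    ring
  have hcR : ∀ x : Int, pvCnt pvSelR Es x = (R.map (fun r => pvInd r x)).sum := by
    intro x
    rw [pvCnt_perm pvSelR hperm, hE, pvCnt_append, pvCnt_append]
    rw [pvCnt_sel_zero pvSelR (pvEvs T (1,0,0)) x (by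
      intro e he
      rcases pvEvs_sel T (1,0,0) e he with h | h <;> simp [pvSelR, h])]
    rw [pvCnt_sel_zero pvSelR (pvEvs P (0,0,1)) x (by
      intro e he
      rcases pvEvs_sel P (0,0,1) e he with h | h <;> simp [pvSelR, h])]
    rw [pvCnt_evs R (0,1,0) pvSelR x (fun r hr => le_of_lt (hR r hr))
      (by intro c; simp [pvSelR]) (by intro c; simp [pvSelR])]
    ring
  have hcP : ∀ x : Int, pvCnt pvSelP Es x = (P.map (fun p => pvInd p x)).sum := by
    intro x
    rw [pvCnt_perm pvSelP hperm, hE, pvCnt_append, pvCnt_append]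
    rw [pvCnt_sel_zero pvSelP (pvEvs R (0,1,0)) x (by
      intro e he
      rcases pvEvs_sel R (0,1,0) e he with h | h <;> simp [pvSelP, h])]
    rw [pvCnt_sel_zero pvSelP (pvEvs T (1,0,0)) x (by
      intro e he
      rcases pvEvs_sel T (1,0,0) e he with h | h <;> simp [pvSelP, h])]
    rw [pvCnt_evs P (0,0,1) pvSelP x (fun p hp => le_of_lt (hP p hp))
      (by intro c; simp [pvSelP]) (by intro c; simp [pvSelP])]
    ring
  -- endpoint bounds
  have hbR : ∀ r ∈ R, lo ≤ r.1 ∧ r.2 ≤ hi := by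
    intro r hr
    obtain ⟨m1, m2⟩ := pvEvs_mem_endpoints R (0,1,0) r hr
    have e1 := hb _ (hperm.mem_iff.mpr (by rw [hE]; exact List.mem_append_left _ (List.mem_append_left _ m1)))
    have e2 := hb _ (hperm.mem_iff.mpr (by rw [hE]; exact List.mem_append_left _ (List.mem_append_left _ m2)))
    exact ⟨e1.1, e2.2⟩
  have hbT : ∀ t ∈ T, lo ≤ t.1 ∧ t.2 ≤ hi := by
    intro t ht
    obtain ⟨m1, m2⟩ := pvEvs_mem_endpoints T (1,0,0) t ht
    have e1 := hb _ (hperm.mem_iff.mpr (by rw [hE]; exact List.mem_append_left _ (List.mem_append_right _ m1)))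
    have e2 := hb _ (hperm.mem_iff.mpr (by rw [hE]; exact List.mem_append_left _ (List.mem_append_right _ m2)))
    exact ⟨e1.1, e2.2⟩
  have hbP : ∀ p ∈ P, lo ≤ p.1 ∧ p.2 ≤ hi := by
    intro p hp
    obtain ⟨m1, m2⟩ := pvEvs_mem_endpoints P (0,0,1) p hp
    have e1 := hb _ (hperm.mem_iff.mpr (by rw [hE]; exact List.mem_append_right _ m1))
    have e2 := hb _ (hperm.mem_iff.mpr (by rw [hE]; exact List.mem_append_right _ m2))
    exact ⟨e1.1, e2.2⟩
  -- run the sweep from lo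
  obtain ⟨hsc, hsk⟩ := pvSweep_eq Es hpw 0 0 0 0 0 lo hi hb
    (by rw [htotT]; ring) (by rw [htotR]; ring) (by rw [htotP]; ring)
  obtain ⟨hshift_c, hshift_k⟩ := pvSweep_shift Es 0 0 0 lo
  have hT2hi : ∀ t ∈ T, ∀ r ∈ R, min r.2 t.2 ≤ hi :=
    fun t ht r hr => le_trans (min_le_left _ _) (hbR r hr).2
  have hT2lo : ∀ t ∈ T, ∀ r ∈ R, lo ≤ max r.1 t.1 :=
    fun t ht r hr => le_trans (hbR r hr).1 (le_max_left _ _)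
  constructor
  · rw [hshift_c, hsc, zero_add]
    rw [Finset.sum_congr rfl (fun x (_ : x ∈ Finset.Ico lo hi) => by
      rw [zero_add, zero_add, hcT x, hcR x])]
    rw [pvSumExpand (Finset.Ico lo hi) T (fun x => (R.map (fun r => pvInd r x)).sum)]
    have inner : ∀ t ∈ T,
        (∑ x ∈ Finset.Ico lo hi, pvInd t x * (R.map (fun r => pvInd r x)).sum)
          = (R.map (fun r => pvOv r t)).sum := by
      intro t ht
      rw [Finset.sum_congr rfl (fun x (_ : x ∈ Finset.Ico lo hi) =>
        mul_comm (pvInd t x) ((R.map (fun r => pvInd r x)).sum))]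
      rw [pvSumExpand (Finset.Ico lo hi) R (fun x => pvInd t x)]
      refine congrArg List.sum (List.map_congr_left ?_)
      intro r hr
      rw [Finset.sum_congr rfl (fun x _ => pvInd_mul2 r t x)]
      rw [pvSum_ind lo hi (max r.1 t.1, min r.2 t.2)
        (fun _ => ⟨hT2lo t ht r hr, hT2hi t ht r hr⟩)]
      rfl
    rw [List.map_congr_left inner]
    exact pvSum_comm T R (fun t r => pvOv r t)
  · rw [hshift_k, hsk, zero_add]
    have hcongr : (∑ x ∈ Finset.Ico lo hi,
        (0 + pvCnt pvSelT Es x) * (0 + pvCnt pvSelR Es x) * (0 + pvCnt pvSelP Es x))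
        = ∑ x ∈ Finset.Ico lo hi,
          (T.map (fun t => pvInd t x)).sum
            * ((R.map (fun r => pvInd r x)).sum * (P.map (fun p => pvInd p x)).sum) :=
      Finset.sum_congr rfl (fun x _ => by
        rw [zero_add, zero_add, zero_add, hcT x, hcR x, hcP x]; ring)
    rw [hcongr]
    rw [pvSumExpand (Finset.Ico lo hi) T
      (fun x => (R.map (fun r => pvInd r x)).sum * (P.map (fun p => pvInd p x)).sum)]
    have inner : ∀ t ∈ T,
        (∑ x ∈ Finset.Ico lo hi,
            pvInd t x * ((R.map (fun r => pvInd r x)).sum * (P.map (fun p => pvInd p x)).sum))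
          = (R.map (fun r => (P.map (fun p => pvTripP r t p)).sum)).sum := by
      intro t ht
      rw [Finset.sum_congr rfl (fun x (_ : x ∈ Finset.Ico lo hi) =>
        (by ring :
          pvInd t x * ((R.map (fun r => pvInd r x)).sum * (P.map (fun p => pvInd p x)).sum)
            = (R.map (fun r => pvInd r x)).sum * ((P.map (fun p => pvInd p x)).sum * pvInd t x)))]
      rw [pvSumExpand (Finset.Ico lo hi) R (fun x => (P.map (fun p => pvInd p x)).sum * pvInd t x)]
      refine congrArg List.sum (List.map_congr_left ?_)
      intro r hr
      rw [Finset.sum_congr rfl (fun x (_ : x ∈ Finset.Ico lo hi) =>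
        (by ring :
          pvInd r x * ((P.map (fun p => pvInd p x)).sum * pvInd t x)
            = (P.map (fun p => pvInd p x)).sum * (pvInd t x * pvInd r x)))]
      rw [pvSumExpand (Finset.Ico lo hi) P (fun x => pvInd t x * pvInd r x)]
      refine congrArg List.sum (List.map_congr_left ?_)
      intro p hp
      rw [Finset.sum_congr rfl (fun x _ => pvInd_mul3 r t p x)]
      rw [pvSum_ind lo hi (max p.1 (max r.1 t.1), min p.2 (min r.2 t.2))
        (fun _ => ⟨le_trans (hbP p hp).1 (le_max_left _ _),
                   le_trans (min_le_left _ _) (hbP p hp).2⟩)]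
      rfl
    rw [List.map_congr_left inner]
    exact pvSum_comm T R (fun t r => (P.map (fun p => pvTripP r t p)).sum)


-- ---------- degenerate intervals contribute nothing ----------

theorem pvSum_filter (L : List (Int × Int)) (f : (Int × Int) → Int)
    (h : ∀ a ∈ L, ¬ a.1 < a.2 → f a = 0) :
    (L.map f).sum = ((L.filter (fun a => decide (a.1 < a.2))).map f).sum := by
  induction L with
  | nil => rfl
  | cons a L ih =>
    simp only [List.map_cons, List.sum_cons, List.filter_cons]
    by_cases hc : a.1 < a.2
    · simp only [hc, decide_true, if_pos, List.map_cons, List.sum_cons]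
      rw [ih (fun b hb => h b (List.mem_cons_of_mem _ hb))]
    · rw [h a (List.mem_cons_self ..) hc]
      simp only [hc, decide_false, if_neg, Bool.false_eq_true, not_false_eq_true]
      rw [ih (fun b hb => h b (List.mem_cons_of_mem _ hb))]
      ring

theorem pvOv_degen (r t : Int × Int) (h : ¬ r.1 < r.2) : pvOv r t = 0 := by
  simp only [pvOv, pvPos]
  rw [if_neg (by omega)]

theorem pvTrip_degen_r (r t p : Int × Int) (h : ¬ r.1 < r.2) : pvTripP r t p = 0 := by
  simp only [pvTripP, pvPos]
  rw [if_neg (by omega)]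

theorem pvTrip_degen_p (r t p : Int × Int) (h : ¬ p.1 < p.2) : pvTripP r t p = 0 := by
  simp only [pvTripP, pvPos]
  rw [if_neg (by omega)]

-- ===== VERDICT (by name: the statement is the Claim_ definition above) =====
theorem calc_uniq_spec : Claim_equal_calc_uniq := by
  intro Rl Rc Tl Tp Pa _ _
  show calc_uniq Rl Rc Tl Tp Pa = calc_uniq_alt Rl Rc Tl Tp Pa
  simp only [calc_uniq, calc_uniq_alt]
  have hparse := pvParse_eq Rc.toList [] 0 0 0
  have hnil : pvEvR [] = [] := rfl
  rw [hnil] at hparse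
  rw [hparse]
  set stA := Rc.toList.foldl pvAStep ([], 0, 0, 0) with hstA
  set Rgaps := stA.1 with hRgaps
  set R' := Rgaps.filter (fun r => decide (r.1 < r.2)) with hR'
  set TL := (if Tp > 0 then [((0 : Int), Tp)] else [])
      ++ (if Tp + Tl < Rl then [(Tp + Tl, Rl)] else []) with hTLdef
  set P0 := Pa.map (fun p => (p.getD 0 0, p.getD 1 0)) with hP0
  set P' := P0.filter (fun q => decide (q.1 < q.2)) with hP'
  have htgaps : (if Tp + Tl < Rl then
        ((if Tp > 0 then ([((0 : Int), Tp)], Tp) else ([], 0)).1 ++ [(Tp + Tl, Rl)],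
         (if Tp > 0 then ([((0 : Int), Tp)], Tp) else ([], (0 : Int))).2 + (Rl - (Tp + Tl)))
      else (if Tp > 0 then ([((0 : Int), Tp)], Tp) else ([], 0))) =
      (TL, (if Tp > 0 then Tp else 0) + (if Tp + Tl < Rl then Rl - (Tp + Tl) else 0)) := by
    rw [hTLdef]; split_ifs <;> simp
  rw [htgaps, pvOuterFold_eq]
  rw [pvPaEvFold Pa]
  -- the event list B sorts is exactly the master theorem's event list
  have hEv : pvEvR Rgaps
        ++ (if Tp > 0 then [((0 : Int), (1 : Int), (0 : Int), (0 : Int)), (Tp, -1, 0, 0)] else [])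
        ++ (if Tp + Tl < Rl then [(Tp + Tl, (1 : Int), (0 : Int), (0 : Int)), (Rl, -1, 0, 0)] else [])
        ++ pvEvs P' (0, 0, 1)
      = pvEvs R' (0, 1, 0) ++ pvEvs TL (1, 0, 0) ++ pvEvs P' (0, 0, 1) := by
    have h1 : pvEvR Rgaps = pvEvs R' (0, 1, 0) := by rw [pvEvR, hR']
    rw [h1, List.append_assoc (pvEvs R' (0, 1, 0)), pvTEvs, hTLdef]
  -- side conditions of the master theorem
  have hR'pos : ∀ r ∈ R', r.1 < r.2 := by
    intro r hr
    have := (List.mem_filter.mp hr).2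
    simpa using this
  have hTLpos : ∀ t ∈ TL, t.1 < t.2 := by
    intro t ht
    rw [hTLdef] at ht
    rcases List.mem_append.mp ht with h | h
    · by_cases hc : Tp > 0
      · rw [if_pos hc] at h; simp only [List.mem_singleton] at h; subst h; simpa using hc
      · rw [if_neg hc] at h; simp at h
    · by_cases hc : Tp + Tl < Rl
      · rw [if_pos hc] at h; simp only [List.mem_singleton] at h; subst h; simpa using hc
      · rw [if_neg hc] at h; simp at h
  have hP'pos : ∀ p ∈ P', p.1 < p.2 := by
    intro p hp
    have := (List.mem_filter.mp hp).2
    simpa using this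
  obtain ⟨hmc, hmk⟩ := pvMaster R' TL P' hR'pos hTLpos hP'pos
  -- A's common as a sum over the filtered gaps
  have hcom : (Rgaps.map (fun r => (TL.map (fun t => pvOv r t)).sum)).sum
      = (R'.map (fun r => (TL.map (fun t => pvOv r t)).sum)).sum := by
    rw [hR']
    apply pvSum_filter
    intro r _ hr
    apply List.sum_eq_zero
    intro y hy
    obtain ⟨t, _, rfl⟩ := List.mem_map.mp hy
    exact pvOv_degen r t hr
  -- A's adaptor overlap as a sum over the filtered gaps and adaptors
  have hinner : ∀ r : Int × Int,
      (TL.map (fun t => (Pa.map (fun p => pvTripP r t (p.getD 0 0, p.getD 1 0))).sum)).sum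
        = (TL.map (fun t => (P'.map (fun p => pvTripP r t p)).sum)).sum := by
    intro r
    refine congrArg List.sum (List.map_congr_left ?_)
    intro t _
    have h1 : (Pa.map (fun p => pvTripP r t (p.getD 0 0, p.getD 1 0))).sum
        = (P0.map (fun q => pvTripP r t q)).sum := by
      rw [hP0, List.map_map]
      rfl
    rw [h1, hP']
    apply pvSum_filter
    intro q _ hq
    exact pvTrip_degen_p r t q hq
  have hcaa : (Rgaps.map (fun r => (TL.map (fun t =>
        (Pa.map (fun p => pvTripP r t (p.getD 0 0, p.getD 1 0))).sum)).sum)).sum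
      = (R'.map (fun r => (TL.map (fun t => (P'.map (fun p => pvTripP r t p)).sum)).sum)).sum := by
    rw [List.map_congr_left (fun r (_ : r ∈ Rgaps) => hinner r), hR']
    apply pvSum_filter
    intro r _ hr
    apply List.sum_eq_zero
    intro y hy
    obtain ⟨t, _, rfl⟩ := List.mem_map.mp hy
    apply List.sum_eq_zero
    intro z hz
    obtain ⟨p, _, rfl⟩ := List.mem_map.mp hz
    exact pvTrip_degen_r r t p hr
  simp only [zero_add]
  rw [hcom, hcaa, hEv, hmc, hmk]
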